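-- pv_equiv track=rewrite | github.com/shiv-mm/Coursera | pwcheck.py | sequence_penalty_alpha
-- ===== SOURCE A (Python) =====
-- def sequence_penalty_alpha(pw: str) -> int:
--     # Penalize ascending alphabetic runs (abc, wxyz); cap -20
--     n = len(pw)
--     penalty = 0
--     i = 0
--     while i < n:
--         run = 1
--         j = i
--         while j + 1 < n:
--             c1 = pw[j].lower()
--             c2 = pw[j + 1].lower()
--             if ("a" <= c1 <= "z") and ("a" <= c2 <= "z") and (ord(c2) == ord(c1) + 1):
--                 run += 1
--                 j += 1
--             else:
--                 break
--         if run >= 3: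
--             penalty += 5 + (run - 3) * 2
--             i = j + 1
--         else:
--             i += 1
--     return min(20, penalty)
-- ===== SOURCE B (Python) =====
-- def sequence_penalty_alpha(pw: str) -> int:
--     # One flat pass: maintain the current ascending-run length, close runs as they end.
--     def succ(a, b):
--         a = a.lower(); b = b.lower()
--         return "a" <= a <= "z" and "a" <= b <= "z" and ord(b) == ord(a) + 1
--
--     def close(run):
--         return 5 + (run - 3) * 2 if run >= 3 else 0
--
--     penalty = 0
--     run = 1
--     for a, b in zip(pw, pw[1:]):
--         if succ(a, b):
--             run += 1
--         else:
--             penalty += close(run)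
--             run = 1
--     penalty += close(run)
--     return min(20, penalty)
-- ===== Notes on version B (the rewrite author's own statement) =====
-- stated objective: simpler
-- what changed: Replaced A's nested while loops with pointer jumping (inner scan re-measuring a run from each start index, restarted per index for short runs) by a single flat pass over adjacent character pairs that maintains the current ascending-run length and closes each run as it ends.
import Mathlib
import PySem

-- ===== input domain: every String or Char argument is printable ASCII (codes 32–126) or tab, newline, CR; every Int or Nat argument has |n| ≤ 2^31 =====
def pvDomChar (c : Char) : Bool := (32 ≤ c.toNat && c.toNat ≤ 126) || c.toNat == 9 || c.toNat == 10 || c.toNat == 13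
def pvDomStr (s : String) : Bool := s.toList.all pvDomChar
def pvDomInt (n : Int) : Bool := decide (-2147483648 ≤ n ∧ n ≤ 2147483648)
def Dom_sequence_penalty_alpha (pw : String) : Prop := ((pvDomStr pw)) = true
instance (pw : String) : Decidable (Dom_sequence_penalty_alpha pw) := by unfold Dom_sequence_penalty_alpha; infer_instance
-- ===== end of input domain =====

-- B replaces A's nested pointer-jumping scan by one flat pass keeping a running run length; objective: simpler.

-- ===== PORT A =====
-- pw[j].lower(), pw[j+1].lower() and the ascending-letter test of A's inner-loop body
def pvStepA (c1 c2 : Char) : Bool :=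
  let d1 := PySem.Chars.lowerChar c1
  let d2 := PySem.Chars.lowerChar c2
  ('a' ≤ d1 && d1 ≤ 'z') && ('a' ≤ d2 && d2 ≤ 'z') && (d2.toNat == d1.toNat + 1)

-- A's inner while loop from position j (current char c, suffix after it):
-- returns the run count and the suffix after the last char of the run (position j+1 onward).
def pvRunA (c : Char) : List Char → Int × List Char
  | [] => (1, [])
  | d :: tl =>
    if pvStepA c d then
      let p := pvRunA d tl
      (p.1 + 1, p.2)
    else (1, d :: tl)

theorem pvRunA_len (c : Char) (l : List Char) : (pvRunA c l).2.length ≤ l.length := by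
  induction l generalizing c with
  | nil => simp [pvRunA]
  | cons d tl ih =>
    simp only [pvRunA]
    split
    · exact Nat.le_trans (ih d) (Nat.le_succ _)
    · simp

-- A's outer while loop over the remaining suffix starting at i
def pvLoopA : List Char → Int
  | [] => 0
  | c :: tl =>
    let p := pvRunA c tl
    if p.1 ≥ 3 then (5 + (p.1 - 3) * 2) + pvLoopA p.2
    else pvLoopA tl
termination_by l => l.length
decreasing_by
  · exact Nat.lt_succ_of_le (pvRunA_len c tl)
  · simp

def sequence_penalty_alpha (pw : String) : Int := min 20 (pvLoopA pw.toList)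

-- ===== PORT B =====
def pvSuccB (a b : Char) : Bool :=
  let a := PySem.Chars.lowerChar a
  let b := PySem.Chars.lowerChar b
  ('a' ≤ a && a ≤ 'z') && ('a' ≤ b && b ≤ 'z') && (b.toNat == a.toNat + 1)

def pvCloseB (run : Int) : Int := if run ≥ 3 then 5 + (run - 3) * 2 else 0

-- the for-loop over zip(pw, pw[1:]): c is the previous char, run/pen the accumulators
def pvFlatB (c : Char) (run pen : Int) : List Char → Int
  | [] => pen + pvCloseB run
  | d :: tl =>
    if pvSuccB c d then pvFlatB d (run + 1) pen tl
    else pvFlatB d 1 (pen + pvCloseB run) tl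

def sequence_penalty_alpha_alt (pw : String) : Int :=
  match pw.toList with
  | [] => min 20 (0 + pvCloseB 1)
  | c :: tl => min 20 (pvFlatB c 1 0 tl)

-- ===== PRECONDITION & SPEC =====
def Spec_sequence_penalty_alpha (pw : String) (out : Int) : Prop := out = sequence_penalty_alpha_alt pw
instance (pw : String) (out : Int) : Decidable (Spec_sequence_penalty_alpha pw out) := by unfold Spec_sequence_penalty_alpha; infer_instance

-- ===== CLAIM (what is proved, stated in full; the proofs are below) =====
def Claim_equal_sequence_penalty_alpha : Prop := ∀ (pw : String), Dom_sequence_penalty_alpha pw → Spec_sequence_penalty_alpha pw (sequence_penalty_alpha pw)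

-- ===== LEMMAS AND PROOFS =====

-- B's flat value of a whole suffix (the quantity pvLoopA is shown to equal)
def pvF : List Char → Int
  | [] => 0
  | c :: tl => pvFlatB c 1 0 tl

theorem pvStepA_eq_succB (a b : Char) : pvStepA a b = pvSuccB a b := rfl

theorem pvRunA_pos (c : Char) (l : List Char) : 1 ≤ (pvRunA c l).1 := by
  induction l generalizing c with
  | nil => simp [pvRunA]
  | cons d tl ih =>
    simp only [pvRunA]
    split
    · have := ih d; omega
    · simp

theorem pvFlatB_pen (c : Char) (run pen : Int) (l : List Char) :
    pvFlatB c run pen l = pen + pvFlatB c run 0 l := by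
  induction l generalizing c run pen with
  | nil => simp [pvFlatB]
  | cons d tl ih =>
    simp only [pvFlatB]
    split
    · rw [ih]
    · rw [ih, ih d 1 (0 + pvCloseB run)]; ring

-- master invariant: flat-loop value = penalty of the run in progress + flat value of the rest
theorem pvFlatB_runA (c : Char) (run : Int) (l : List Char) :
    pvFlatB c run 0 l = pvCloseB (run - 1 + (pvRunA c l).1) + pvF (pvRunA c l).2 := by
  induction l generalizing c run with
  | nil => simp [pvFlatB, pvRunA, pvF]
  | cons d tl ih =>
    simp only [pvFlatB, pvRunA, ← pvStepA_eq_succB]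
    split
    · rw [ih d (run + 1)]
      have h2 : run + 1 - 1 + (pvRunA d tl).1 = run - 1 + ((pvRunA d tl).1 + 1) := by ring
      rw [h2]
    · simp only [pvF]
      rw [pvFlatB_pen]
      have h3 : run - 1 + 1 = run := by ring
      rw [h3]
      ring

theorem pvCloseB_lt (run : Int) (h : run < 3) : pvCloseB run = 0 := by
  simp [pvCloseB]; omega

theorem pvLoopA_eq_pvF (l : List Char) : pvLoopA l = pvF l := by
  induction hn : l.length using Nat.strong_induction_on generalizing l with
  | _ n ih =>
  cases l with
  | nil => simp [pvLoopA, pvF]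
  | cons c tl =>
    have hrest := pvRunA_len c tl
    have hF : pvF (c :: tl) = pvCloseB (pvRunA c tl).1 + pvF (pvRunA c tl).2 := by
      have := pvFlatB_runA c 1 tl
      simp at this
      simpa [pvF] using this
    by_cases h3 : (pvRunA c tl).1 ≥ 3
    · have hA : pvLoopA (c :: tl) = (5 + ((pvRunA c tl).1 - 3) * 2) + pvLoopA (pvRunA c tl).2 := by
        simp [pvLoopA, h3]
      rw [hA, hF, ih (pvRunA c tl).2.length (by subst hn; simp; omega) _ rfl]
      simp [pvCloseB, h3]
    · have hA : pvLoopA (c :: tl) = pvLoopA tl := by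
        simp [pvLoopA, h3]
      rw [hA, hF, pvCloseB_lt _ (by omega)]
      have h1 := pvRunA_pos c tl
      -- run is 1 or 2; show pvF (pvRunA c tl).2 = pvF tl
      have hFt : pvF (pvRunA c tl).2 = pvF tl := by
        cases tl with
        | nil => simp [pvRunA, pvF]
        | cons d tl' =>
          by_cases hs : pvStepA c d
          · -- run = 1 + run from d; here total < 3 and ≥ 2, so inner run = 1
            have hd : pvRunA c (d :: tl') = ((pvRunA d tl').1 + 1, (pvRunA d tl').2) := by
              simp [pvRunA, hs]
            have hd1 := pvRunA_pos d tl'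
            have hone : (pvRunA d tl').1 = 1 := by
              rw [hd] at h3; simp at h3; omega
            -- inner run 1 ⇒ its rest is tl'
            have hrest' : (pvRunA d tl').2 = tl' := by
              cases tl' with
              | nil => simp [pvRunA]
              | cons e tl'' =>
                by_cases he : pvStepA d e
                · exfalso
                  have := pvRunA_pos e tl''
                  simp [pvRunA, he] at hone; omega
                · simp [pvRunA, he]
            rw [hd]
            simp only
            rw [hrest']
            -- pvF tl' = pvF (d :: tl') since run from d is 1
            have : pvF (d :: tl') = pvCloseB 1 + pvF tl' := by
              have := pvFlatB_runA d 1 tl'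
              simp [hone, hrest'] at this
              simpa [pvF, pvCloseB] using this
            simp [pvCloseB] at this
            omega
          · simp [pvRunA, hs]
      rw [hFt]
      have := ih tl.length (by subst hn; simp) tl rfl
      omega

theorem pvPorts_eq (pw : String) : sequence_penalty_alpha pw = sequence_penalty_alpha_alt pw := by
  unfold sequence_penalty_alpha sequence_penalty_alpha_alt
  rw [pvLoopA_eq_pvF]
  cases pw.toList with
  | nil => simp [pvF, pvCloseB]
  | cons c tl => rfl

-- ===== VERDICT (by name: the statement is the Claim_ definition above) =====
theorem sequence_penalty_alpha_spec : Claim_equal_sequence_penalty_alpha := by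
  intro pw _
  unfold Spec_sequence_penalty_alpha
  exact pvPorts_eq pw
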